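-- pv_equiv track=rewrite | github.com/tsuru7/algorithm-study | AtCoder/RECOMM/2022/11/13/A.py | solve
-- ===== SOURCE A (Python) =====
-- def solve(n,k):
--     MOD = 10**9+7
--     ans=0
--     for i in range(k, n+1):
--         m = n-i
--         min_ = i*(i-1)//2
--         max_ = n*(n+1)//2 - m*(m-1)//2
--         ans += max_ - min_ + 1
--         ans %= MOD
--
--     return ans
-- ===== SOURCE B (Python) =====
-- def solve(n, k):
--     # Closed-form summation of the per-i counts (sum of binomials), one mod at the end.
--     MOD = 10**9 + 7
--     if n < k:
--         return 0
--     t = n - k + 1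
--     s = (t * (n*(n+1)//2 + 1)
--          - t*(t-1)*(t-2)//6
--          - (n+1)*n*(n-1)//6
--          + k*(k-1)*(k-2)//6)
--     return s % MOD
-- ===== Notes on version B (the rewrite author's own statement) =====
-- stated objective: faster
-- what changed: Replaced the O(n-k) loop accumulating per-i interval counts mod p by a closed-form summation (binomial/telescoping formulas for the triangular-number sums) with a single mod at the end; intended as faster (O(1) vs O(n-k)), measured up to ~80x at the largest size on inputs where the loop actually runs (inputs with k>n make both O(1), so the timing sample is mixed).
import Mathlib
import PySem

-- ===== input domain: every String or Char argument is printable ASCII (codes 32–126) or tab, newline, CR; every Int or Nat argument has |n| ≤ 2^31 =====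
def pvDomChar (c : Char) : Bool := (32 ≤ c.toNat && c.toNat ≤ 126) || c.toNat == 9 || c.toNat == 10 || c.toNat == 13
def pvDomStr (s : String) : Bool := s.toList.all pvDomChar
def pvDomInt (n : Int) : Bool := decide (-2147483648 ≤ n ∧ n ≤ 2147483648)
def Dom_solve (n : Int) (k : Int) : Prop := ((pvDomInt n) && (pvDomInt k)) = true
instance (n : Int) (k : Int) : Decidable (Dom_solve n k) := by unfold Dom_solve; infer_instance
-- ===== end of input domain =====

-- B replaces A's O(n-k) loop by an O(1) closed-form summation with one final mod.

-- ===== PORT A =====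
def solve (n : Int) (k : Int) : Int :=
  let MOD : Int := 10^9+7
  (PySem.List.pyRange k (n+1) 1).foldl
    (fun ans i =>
      let m := n - i
      let min_ := PySem.Int.floordiv (i*(i-1)) 2
      let max_ := PySem.Int.floordiv (n*(n+1)) 2 - PySem.Int.floordiv (m*(m-1)) 2
      PySem.Int.mod (ans + (max_ - min_ + 1)) MOD)
    0

-- ===== PORT B =====
def solve_alt (n : Int) (k : Int) : Int :=
  let MOD : Int := 10^9+7
  if n < k then 0
  else
    let t := n - k + 1
    let s := t * (PySem.Int.floordiv (n*(n+1)) 2 + 1)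
      - PySem.Int.floordiv (t*(t-1)*(t-2)) 6
      - PySem.Int.floordiv ((n+1)*n*(n-1)) 6
      + PySem.Int.floordiv (k*(k-1)*(k-2)) 6
    PySem.Int.mod s MOD

-- ===== PRECONDITION & SPEC =====
def Spec_solve (n : Int) (k : Int) (out : Int) : Prop := out = solve_alt n k
instance (n : Int) (k : Int) (out : Int) : Decidable (Spec_solve n k out) := by unfold Spec_solve; infer_instance

-- ===== CLAIM (what is proved, stated in full; the proofs are below) =====
def Claim_equal_solve : Prop := ∀ (n : Int) (k : Int), Dom_solve n k → Spec_solve n k (solve n k)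

-- ===== LEMMAS AND PROOFS =====

-- exact division when the divisor divides
lemma fdiv_exact (a b : Int) (hb : 0 < b) (h : b ∣ a) :
    b * PySem.Int.floordiv a b = a := by
  rw [PySem.Int.floordiv_eq_ediv_of_pos hb]
  exact Int.mul_ediv_cancel' h

lemma two_dvd_mul_pred (x : Int) : (2:Int) ∣ x*(x-1) := by
  obtain ⟨c, hc⟩ := Int.even_mul_succ_self (x-1)
  exact ⟨c, by linear_combination hc⟩

lemma six_dvd_three_consec (x : Int) : (6:Int) ∣ x*(x-1)*(x-2) := by
  have hmod : Int.ModEq 6 x (x % 6) := (Int.emod_emod_of_dvd x dvd_rfl).symm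
  have hP : Int.ModEq 6 (x*(x-1)*(x-2)) ((x%6)*((x%6)-1)*((x%6)-2)) :=
    (hmod.mul (hmod.sub_right 1)).mul (hmod.sub_right 2)
  have hr : (6:Int) ∣ (x%6)*((x%6)-1)*((x%6)-2) := by
    have h0 : 0 ≤ x % 6 := Int.emod_nonneg x (by norm_num)
    have h1 : x % 6 < 6 := Int.emod_lt_of_pos x (by norm_num)
    interval_cases h : (x % 6) <;> decide
  exact (Int.modEq_zero_iff_dvd).mp (hP.trans ((Int.modEq_zero_iff_dvd).mpr hr))

-- mod-at-each-step fold equals one mod of the plain sum (nonempty list)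
lemma foldmod (f : Int → Int) :
    ∀ (l : List Int) (a : Int), l ≠ [] →
      l.foldl (fun ans i => PySem.Int.mod (ans + f i) (10^9+7)) a
        = (a + (l.map f).sum) % (10^9+7) := by
  intro l
  induction l with
  | nil => intro a h; exact absurd rfl h
  | cons x l ih =>
    intro a _
    by_cases h : l = []
    · subst h
      simp
    · simp only [List.foldl_cons, List.map_cons, List.sum_cons]
      rw [ih _ h, PySem.Int.mod_eq_emod_of_pos (by norm_num : (0:Int) < 10^9+7),
        Int.emod_add_emod]
      ring_nf

-- 6 × (sum of A's loop terms over i = k..n) as a closed polynomial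
lemma sum_terms (n : Int) :
    ∀ (d : Nat) (k : Int), n + 1 - k = (d:Int) →
      6 * ((PySem.List.pyRange k (n+1) 1).map
            (fun i => PySem.Int.floordiv (n*(n+1)) 2
              - PySem.Int.floordiv ((n-i)*((n-i)-1)) 2
              - PySem.Int.floordiv (i*(i-1)) 2 + 1)).sum
        = 3*(n-k+1)*(n*(n+1)) + 6*(n-k+1)
            - (n-k+1)*(n-k)*(n-k-1) - (n+1)*n*(n-1) + k*(k-1)*(k-2) := by
  intro d
  induction d with
  | zero =>
    intro k hk
    have hk' : k = n + 1 := by omega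
    subst hk'
    rw [PySem.List.pyRange_one_eq_nil le_rfl]
    simp; ring
  | succ d ih =>
    intro k hk
    rw [PySem.List.pyRange_one_cons (by omega : k < n + 1)]
    simp only [List.map_cons, List.sum_cons]
    rw [mul_add, ih (k+1) (by omega)]
    have hA : 2 * PySem.Int.floordiv (n*(n+1)) 2 = n*(n+1) := by
      have := fdiv_exact (n*(n+1)) 2 (by norm_num)
        ⟨(two_dvd_mul_pred (n+1)).choose, by
          have h := (two_dvd_mul_pred (n+1)).choose_spec; linear_combination h⟩
      exact this
    have hB : 2 * PySem.Int.floordiv ((n-k)*((n-k)-1)) 2 = (n-k)*((n-k)-1) :=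
      fdiv_exact _ 2 (by norm_num) (two_dvd_mul_pred (n-k))
    have hC : 2 * PySem.Int.floordiv (k*(k-1)) 2 = k*(k-1) :=
      fdiv_exact _ 2 (by norm_num) (two_dvd_mul_pred k)
    linear_combination 3*hA - 3*hB - 3*hC

-- ===== VERDICT (by name: the statement is the Claim_ definition above) =====
theorem solve_spec : Claim_equal_solve := by
  intro n k _
  show solve n k = solve_alt n k
  by_cases h : n < k
  · show (PySem.List.pyRange k (n+1) 1).foldl _ 0 = solve_alt n k
    rw [PySem.List.pyRange_one_eq_nil (by omega)]
    simp [solve_alt, h]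
  · have hk : k ≤ n := by omega
    -- B's closed form
    have hs : ∃ s : Int, s = (n-k+1) * (PySem.Int.floordiv (n*(n+1)) 2 + 1)
      - PySem.Int.floordiv ((n-k+1)*((n-k+1)-1)*((n-k+1)-2)) 6
      - PySem.Int.floordiv ((n+1)*n*(n-1)) 6
      + PySem.Int.floordiv (k*(k-1)*(k-2)) 6 := ⟨_, rfl⟩
    obtain ⟨s, hs⟩ := hs
    -- A = (sum of terms) % M
    have hne : PySem.List.pyRange k (n+1) 1 ≠ [] := by
      rw [PySem.List.pyRange_one_cons (by omega : k < n + 1)]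
      exact List.cons_ne_nil _ _
    have hA : solve n k
        = (0 + ((PySem.List.pyRange k (n+1) 1).map
            (fun i => PySem.Int.floordiv (n*(n+1)) 2
              - PySem.Int.floordiv ((n-i)*((n-i)-1)) 2
              - PySem.Int.floordiv (i*(i-1)) 2 + 1)).sum) % (10^9+7) := by
      show (PySem.List.pyRange k (n+1) 1).foldl
        (fun ans i => PySem.Int.mod (ans + (PySem.Int.floordiv (n*(n+1)) 2
          - PySem.Int.floordiv ((n-i)*((n-i)-1)) 2
          - PySem.Int.floordiv (i*(i-1)) 2 + 1)) (10^9+7)) 0 = _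
      exact foldmod _ _ 0 hne
    -- 6·sum = Q and 6·s = Q ⇒ sum = s
    have hsum := sum_terms n (n + 1 - k).toNat k (by omega)
    have h6s : 6 * s = 3*(n-k+1)*(n*(n+1)) + 6*(n-k+1)
        - (n-k+1)*(n-k)*(n-k-1) - (n+1)*n*(n-1) + k*(k-1)*(k-2) := by
      have hA2 : 2 * PySem.Int.floordiv (n*(n+1)) 2 = n*(n+1) :=
        fdiv_exact _ 2 (by norm_num)
          ⟨(two_dvd_mul_pred (n+1)).choose, by
            have h := (two_dvd_mul_pred (n+1)).choose_spec; linear_combination h⟩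
      have hU : 6 * PySem.Int.floordiv ((n-k+1)*((n-k+1)-1)*((n-k+1)-2)) 6
          = (n-k+1)*((n-k+1)-1)*((n-k+1)-2) :=
        fdiv_exact _ 6 (by norm_num) (six_dvd_three_consec (n-k+1))
      have hV : 6 * PySem.Int.floordiv ((n+1)*n*(n-1)) 6 = (n+1)*n*(n-1) :=
        fdiv_exact _ 6 (by norm_num)
          ⟨(six_dvd_three_consec (n+1)).choose, by
            have h := (six_dvd_three_consec (n+1)).choose_spec; linear_combination h⟩
      have hW : 6 * PySem.Int.floordiv (k*(k-1)*(k-2)) 6 = k*(k-1)*(k-2) :=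
        fdiv_exact _ 6 (by norm_num) (six_dvd_three_consec k)
      rw [hs]
      linear_combination 3*(n-k+1)*hA2 - hU - hV + hW
    have heq : ((PySem.List.pyRange k (n+1) 1).map
            (fun i => PySem.Int.floordiv (n*(n+1)) 2
              - PySem.Int.floordiv ((n-i)*((n-i)-1)) 2
              - PySem.Int.floordiv (i*(i-1)) 2 + 1)).sum = s := by
      have := hsum
      omega
    rw [hA, heq]
    rw [hs]
    show (0 + _) % (10^9+7)
      = if n < k then (0:Int) else PySem.Int.mod _ (10^9+7)
    rw [if_neg h, PySem.Int.mod_eq_emod_of_pos (by norm_num : (0:Int) < 10^9+7)]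
    ring_nf
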